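-- pv_equiv track=rewrite | github.com/KevinKnott/Coding-Review | Week 02/Day 01/b.py | countBinarySubstringsOnePass
-- ===== SOURCE A (Python) =====
-- def countBinarySubstringsOnePass(s: str) -> int:
--     count, prev, cur = 0, 0, 1
--     # Create a bucket increasing the number of top everytime you see a similar char
--     for i in range(1, len(s)):
--         if s[i] != s[i-1]:
--             count += min(prev, cur)
--             prev, cur = cur, 1
--         # otherwise put a 1 on the top of the bucket
--         else:
--             cur += 1
--
--     # Only difference is that we need to add the last piece on since this terminates before the last calc
--     return count + min(prev, cur)
-- ===== SOURCE B (Python) =====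
-- def countBinarySubstringsOnePass(s: str) -> int:
--     # Expand-around-boundary: at every index where the character changes,
--     # grow outwards while both sides keep repeating their boundary character;
--     # the reach of each expansion is the number of valid substrings centred there.
--     n = len(s)
--     total = 0
--     for i in range(1, n):
--         if s[i] != s[i - 1]:
--             k = 1
--             while k + 1 <= i and i + k < n and s[i - 1 - k] == s[i - 1] and s[i + k] == s[i]:
--                 k += 1
--             total += k
--     return total
-- ===== Notes on version B (the rewrite author's own statement) =====
-- stated objective: alternative
-- what changed: A makes one linear pass keeping rolling prev/cur run counters and adds min(prev,cur) at each character change; B scans for boundary indices and, at each boundary, expands outwards two-pointer style while both sides keep repeating their boundary character, summing the expansion reach.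
import Mathlib
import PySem

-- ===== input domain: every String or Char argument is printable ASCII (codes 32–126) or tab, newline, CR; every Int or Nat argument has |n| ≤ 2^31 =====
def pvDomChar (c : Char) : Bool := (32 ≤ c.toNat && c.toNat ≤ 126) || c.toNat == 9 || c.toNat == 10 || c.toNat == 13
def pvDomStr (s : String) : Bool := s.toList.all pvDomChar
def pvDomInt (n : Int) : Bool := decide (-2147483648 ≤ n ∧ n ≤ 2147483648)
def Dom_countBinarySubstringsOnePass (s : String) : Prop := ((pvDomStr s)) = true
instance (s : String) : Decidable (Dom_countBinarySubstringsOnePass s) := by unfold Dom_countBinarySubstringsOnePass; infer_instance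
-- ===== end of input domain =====

-- B replaces A's single rolling prev/cur run-counter pass by an expand-around-boundary
-- scheme: at each index where the character changes it grows outwards two-pointer style
-- and adds the reach of the expansion (alternative algorithm, same result).

-- ===== PORT A =====
-- A's for-loop over i in range(1, len(s)) comparing s[i] with s[i-1], carried as a
-- structural recursion over the tail of the char list with the previous char in hand.
def loopA : List Char → Char → Int × Int × Int → Int × Int × Int
  | [], _, st => st
  | c :: rest, prevC, (count, prev, cur) =>
      if c ≠ prevC then loopA rest c (count + min prev cur, cur, 1)
      else loopA rest c (count, prev, cur + 1)

def countBinarySubstringsOnePass (s : String) : Int :=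
  match s.toList with
  | [] => (0 : Int) + min 0 1
  | c :: rest =>
      match loopA rest c (0, 0, 1) with
      | (count, prev, cur) => count + min prev cur

-- ===== PORT B =====
-- B's inner while-loop: expand k while both sides keep repeating the boundary chars.
-- Python s[j] is ported as l.getD j 'a' — exact here because every index used is
-- guarded in range by the preceding bound checks (k+1 ≤ i, i+k < n) and the loop range.
def bExpand (l : List Char) (n i k : Nat) : Nat :=
  if h : k + 1 ≤ i ∧ i + k < n ∧ l.getD (i - 1 - k) 'a' = l.getD (i - 1) 'a' ∧
         l.getD (i + k) 'a' = l.getD i 'a' then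
    bExpand l n i (k + 1)
  else k
termination_by n - (i + k)
decreasing_by omega

-- for i in range(1, n): if s[i] != s[i-1]: total += <expansion reach>
def countBinarySubstringsOnePass_alt (s : String) : Int :=
  let l := s.toList
  let n := l.length
  (List.range' 1 (n - 1)).foldl
    (fun total i =>
      if l.getD i 'a' ≠ l.getD (i - 1) 'a' then total + (bExpand l n i 1 : Int) else total)
    0

-- ===== PRECONDITION & SPEC =====
def Spec_countBinarySubstringsOnePass (s : String) (out : Int) : Prop := out = countBinarySubstringsOnePass_alt s
instance (s : String) (out : Int) : Decidable (Spec_countBinarySubstringsOnePass s out) := by unfold Spec_countBinarySubstringsOnePass; infer_instance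

-- ===== CLAIM (what is proved, stated in full; the proofs are below) =====
def Claim_equal_countBinarySubstringsOnePass : Prop := ∀ (s : String), Dom_countBinarySubstringsOnePass s → Spec_countBinarySubstringsOnePass s (countBinarySubstringsOnePass s)

-- ===== LEMMAS AND PROOFS =====

-- Run-length decomposition used only by the proofs: runsFrom rest c run is the list of
-- (char, run length) groups of `replicate run c ++ rest`.
def runsFrom : List Char → Char → Nat → List (Char × Nat)
  | [], c, run => [(c, run)]
  | x :: rest, c, run =>
      if x == c then runsFrom rest x (run + 1) else (c, run) :: runsFrom rest x 1

def lens (gs : List (Char × Nat)) : List Int := gs.map (fun p => (p.2 : Int))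

def sumAdj (gs : List Int) : Int := (List.zipWith min gs gs.tail).sum

def flat (gs : List (Char × Nat)) : List Char := gs.flatMap (fun p => List.replicate p.2 p.1)

def term (l : List Char) (i : Nat) : Int :=
  if l.getD i 'a' ≠ l.getD (i - 1) 'a' then (bExpand l l.length i 1 : Int) else 0

theorem runsFrom_head (rest : List Char) : ∀ (c : Char) (run : Nat),
    ∃ g gs, runsFrom rest c run = (c, g) :: gs ∧ run ≤ g := by
  induction rest with
  | nil => intro c run; exact ⟨run, [], rfl, le_refl _⟩
  | cons x rest ih =>
      intro c run
      by_cases h : x == c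
      · have hx : x = c := by simpa using h
        subst hx
        simp only [runsFrom, beq_self_eq_true, if_true]
        obtain ⟨g, gs, he, hle⟩ := ih x (run + 1)
        exact ⟨g, gs, he, by omega⟩
      · simp only [runsFrom, h, Bool.false_eq_true, if_false]
        exact ⟨run, runsFrom rest x 1, rfl, le_refl _⟩

theorem sumAdj_cons_cons (a b : Int) (l : List Int) :
    sumAdj (a :: b :: l) = min a b + sumAdj (b :: l) := by
  simp [sumAdj]

theorem loopA_eq (rest : List Char) : ∀ (prevC : Char) (count prev : Int) (cur : Nat),
    (loopA rest prevC (count, prev, (cur : Int))).1 +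
      min (loopA rest prevC (count, prev, (cur : Int))).2.1
          (loopA rest prevC (count, prev, (cur : Int))).2.2
      = count + sumAdj (prev :: lens (runsFrom rest prevC cur)) := by
  induction rest with
  | nil =>
      intro prevC count prev cur
      simp [loopA, runsFrom, lens, sumAdj]
  | cons c rest ih =>
      intro prevC count prev cur
      by_cases h : c = prevC
      · subst h
        have hc : ((cur : Int) + 1) = ((cur + 1 : Nat) : Int) := by push_cast; ring
        simp only [loopA, runsFrom, ne_eq, not_true_eq_false, if_false, beq_self_eq_true,
          if_true, hc]
        exact ih c count prev (cur + 1)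
      · have hb : (c == prevC) = false := by simp [h]
        simp only [loopA, runsFrom, ne_eq, h, not_false_eq_true, if_true, hb,
          Bool.false_eq_true, if_false]
        have hih := ih c (count + min prev (cur : Int)) (cur : Int) 1
        norm_num at hih ⊢
        rw [hih]
        obtain ⟨g, gs, he, hle⟩ := runsFrom_head rest c 1
        rw [he]
        simp only [lens, List.map_cons]
        rw [sumAdj_cons_cons, sumAdj_cons_cons, sumAdj_cons_cons]
        ring

theorem flat_runsFrom (rest : List Char) : ∀ (c : Char) (run : Nat),
    flat (runsFrom rest c run) = List.replicate run c ++ rest := by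
  induction rest with
  | nil => intro c run; simp [runsFrom, flat]
  | cons x rest ih =>
      intro c run
      by_cases h : x == c
      · have hx : x = c := by simpa using h
        subst hx
        simp only [runsFrom, beq_self_eq_true, if_true]
        rw [ih x (run + 1), List.replicate_succ', List.append_assoc]
        rfl
      · simp only [runsFrom, h, Bool.false_eq_true, if_false]
        simp only [flat, List.flatMap_cons]
        rw [show (List.flatMap (fun p => List.replicate p.2 p.1) (runsFrom rest x 1)) =
              flat (runsFrom rest x 1) from rfl, ih x 1]
        rfl

theorem runsFrom_chain (rest : List Char) : ∀ (c : Char) (run : Nat),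
    List.IsChain (fun p q => p.1 ≠ q.1) (runsFrom rest c run) := by
  induction rest with
  | nil => intro c run; exact List.IsChain.singleton _
  | cons x rest ih =>
      intro c run
      by_cases h : x == c
      · have hx : x = c := by simpa using h
        subst hx
        simpa only [runsFrom, beq_self_eq_true, if_true] using ih x (run + 1)
      · have hne : c ≠ x := by
          intro he
          exact h (by rw [he]; exact beq_self_eq_true x)
        simp only [runsFrom, h, Bool.false_eq_true, if_false]
        obtain ⟨g, gs, he, _⟩ := runsFrom_head rest x 1
        rw [he]
        rw [List.isChain_cons_cons]
        exact ⟨hne, he ▸ ih x 1⟩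

theorem runsFrom_pos (rest : List Char) : ∀ (c : Char) (run : Nat), 1 ≤ run →
    ∀ p ∈ runsFrom rest c run, 1 ≤ p.2 := by
  induction rest with
  | nil => intro c run hr p hp; simp [runsFrom] at hp; subst hp; simpa using hr
  | cons x rest ih =>
      intro c run hr p hp
      by_cases h : x == c
      · simp only [runsFrom, h, if_true] at hp
        exact ih x (run + 1) (by omega) p hp
      · simp only [runsFrom, h, Bool.false_eq_true, if_false, List.mem_cons] at hp
        rcases hp with hp | hp
        · subst hp; simpa using hr
        · exact ih x 1 (le_refl _) p hp

-- (u ++ (replicate m x ++ v))[u.length + j] = x for j < m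
theorem getD_mid (u v : List Char) (x : Char) (m j : Nat) (hj : j < m) :
    (u ++ (List.replicate m x ++ v)).getD (u.length + j) 'a' = x := by
  rw [List.getD_append_right _ _ _ _ (by omega)]
  have h1 : u.length + j - u.length = j := by omega
  rw [h1, List.getD_append _ _ _ _ (by simpa using hj), List.getD_replicate x hj]

theorem getD_mid2 (u v : List Char) (c d : Char) (a b j : Nat) (hj : j < b) :
    (u ++ (List.replicate a c ++ (List.replicate b d ++ v))).getD (u.length + a + j) 'a' = d := by
  have h := getD_mid (u ++ List.replicate a c) v d b j hj
  simpa [List.append_assoc, Nat.add_assoc] using h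

theorem getD_after2 (u v : List Char) (c d : Char) (a b : Nat) :
    (u ++ (List.replicate a c ++ (List.replicate b d ++ v))).getD (u.length + a + b) 'a'
      = v.getD 0 'a' := by
  have h : ((u ++ List.replicate a c ++ List.replicate b d) ++ v).getD
      ((u ++ List.replicate a c ++ List.replicate b d).length + 0) 'a' = v.getD 0 'a' := by
    rw [List.getD_append_right _ _ _ _ (by omega)]
    congr 1
    omega
  simpa [List.append_assoc, Nat.add_assoc] using h

theorem getD_lastpos (u v : List Char) (x : Char) (hu : u.getLast? = some x) :
    (u ++ v).getD (u.length - 1) 'a' = x := by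
  have hne : u ≠ [] := by intro he; rw [he] at hu; simp at hu
  have hlen : 1 ≤ u.length := List.length_pos_iff.mpr hne
  rw [List.getD_append _ _ _ _ (by omega), List.getD_eq_getElem u 'a' (by omega)]
  rw [List.getLast?_eq_some_getLast hne, Option.some_inj] at hu
  rw [← hu, List.getLast_eq_getElem hne]

theorem getLast?_append_replicate (u : List Char) (c : Char) (a : Nat) (ha : 1 ≤ a) :
    (u ++ List.replicate a c).getLast? = some c := by
  obtain ⟨a', rfl⟩ : ∃ a', a = a' + 1 := ⟨a - 1, by omega⟩
  rw [List.replicate_succ', ← List.append_assoc, List.getLast?_concat]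

-- expansion reach at a boundary between a run of a copies of c and a run of b copies of d
theorem bExpand_min (u v : List Char) (c d : Char) (a b : Nat)
    (ha : 1 ≤ a) (hb : 1 ≤ b) (_hcd : c ≠ d)
    (hu : ∀ x, u.getLast? = some x → x ≠ c)
    (hv : ∀ x, v.head? = some x → x ≠ d) :
    ∀ (m k : Nat), 1 ≤ k → k ≤ min a b → min a b - k = m →
    bExpand (u ++ (List.replicate a c ++ (List.replicate b d ++ v)))
      (u ++ (List.replicate a c ++ (List.replicate b d ++ v))).length
      (u.length + a) k = min a b := by
  intro m
  induction m with
  | zero =>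
      intro k hk1 hk2 hm
      have hk : k = min a b := by omega
      rw [bExpand, dif_neg]
      · exact hk
      rintro ⟨h1, h2, h3, h4⟩
      by_cases hab : a ≤ b
      · -- k = a; the left side leaves its run
        have hka : k = a := by omega
        by_cases hun : u = []
        · subst hun; simp at h1; omega
        · obtain ⟨x, hx⟩ : ∃ x, u.getLast? = some x :=
            ⟨u.getLast hun, List.getLast?_eq_some_getLast hun⟩
          have hidx : u.length + a - 1 - k = u.length - 1 := by omega
          rw [hidx] at h3
          have hxv := getD_lastpos u (List.replicate a c ++ (List.replicate b d ++ v)) x hx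
          have hc1 : (u ++ (List.replicate a c ++ (List.replicate b d ++ v))).getD
              (u.length + a - 1) 'a' = c := by
            have := getD_mid u (List.replicate b d ++ v) c a (a - 1) (by omega)
            have hidx2 : u.length + (a - 1) = u.length + a - 1 := by omega
            rwa [hidx2] at this
          rw [hxv, hc1] at h3
          exact hu x hx h3
      · -- k = b; the right side leaves its run
        have hkb : k = b := by omega
        have hvlen : 1 ≤ v.length := by
          simp only [List.length_append, List.length_replicate] at h2
          omega
        obtain ⟨y, hy⟩ : ∃ y, v.head? = some y := by
          cases v with
          | nil => simp at hvlen
          | cons z t => exact ⟨z, rfl⟩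
        have hyv : (u ++ (List.replicate a c ++ (List.replicate b d ++ v))).getD
            (u.length + a + b) 'a' = y := by
          rw [getD_after2]
          cases v with
          | nil => simp at hy
          | cons z t => simp at hy; simp [hy]
        have hd1 : (u ++ (List.replicate a c ++ (List.replicate b d ++ v))).getD
            (u.length + a) 'a' = d := by
          have := getD_mid2 u v c d a b 0 (by omega)
          simpa using this
        rw [hkb, hyv, hd1] at h4
        exact hv y hy h4
  | succ m ih =>
      intro k hk1 hk2 hm
      have hka : k < a := by omega
      have hkb : k < b := by omega
      rw [bExpand, dif_pos]
      · exact ih (k + 1) (by omega) (by omega) (by omega)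
      refine ⟨by omega, ?_, ?_, ?_⟩
      · simp only [List.length_append, List.length_replicate]
        omega
      · have hl : (u ++ (List.replicate a c ++ (List.replicate b d ++ v))).getD
            (u.length + a - 1 - k) 'a' = c := by
          have := getD_mid u (List.replicate b d ++ v) c a (a - 1 - k) (by omega)
          have hidx : u.length + (a - 1 - k) = u.length + a - 1 - k := by omega
          rwa [hidx] at this
        have hr : (u ++ (List.replicate a c ++ (List.replicate b d ++ v))).getD
            (u.length + a - 1) 'a' = c := by
          have := getD_mid u (List.replicate b d ++ v) c a (a - 1) (by omega)
          have hidx : u.length + (a - 1) = u.length + a - 1 := by omega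
          rwa [hidx] at this
        rw [hl, hr]
      · have hl : (u ++ (List.replicate a c ++ (List.replicate b d ++ v))).getD
            (u.length + a + k) 'a' = d := getD_mid2 u v c d a b k hkb
        have hr : (u ++ (List.replicate a c ++ (List.replicate b d ++ v))).getD
            (u.length + a) 'a' = d := by
          have := getD_mid2 u v c d a b 0 (by omega)
          simpa using this
        rw [hl, hr]

-- inside a run the boundary test fails
theorem term_in_run (u v : List Char) (x : Char) (m j : Nat) (h1 : 1 ≤ j) (hj : j < m) :
    term (u ++ (List.replicate m x ++ v)) (u.length + j) = 0 := by
  unfold term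
  rw [if_neg]
  simp only [ne_eq, not_not]
  have hidx : u.length + j - 1 = u.length + (j - 1) := by omega
  rw [getD_mid u v x m j hj, hidx, getD_mid u v x m (j - 1) (by omega)]

theorem foldl_term (l : List Char) : ∀ (r : List Nat) (acc : Int),
    r.foldl (fun total i =>
      if l.getD i 'a' ≠ l.getD (i - 1) 'a' then total + (bExpand l l.length i 1 : Int)
      else total) acc = acc + (r.map (term l)).sum := by
  intro r
  induction r with
  | nil => intro acc; simp
  | cons i r ih =>
      intro acc
      simp only [List.foldl_cons, List.map_cons, List.sum_cons]
      rw [ih]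
      unfold term
      split
      · ring
      · ring

theorem sum_terms (gs : List (Char × Nat)) : ∀ (u : List Char) (c : Char) (a : Nat),
    1 ≤ a →
    (∀ x, u.getLast? = some x → x ≠ c) →
    List.IsChain (fun p q => p.1 ≠ q.1) ((c, a) :: gs) →
    (∀ p ∈ gs, 1 ≤ p.2) →
    ((List.range' (u.length + a) (flat gs).length).map
        (term (u ++ (List.replicate a c ++ flat gs)))).sum
      = sumAdj (lens ((c, a) :: gs)) := by
  induction gs with
  | nil =>
      intro u c a _ _ _ _
      simp [flat, lens, sumAdj]
  | cons p gs ih =>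
      obtain ⟨d, b⟩ := p
      intro u c a ha hu hchain hpos
      have hcd : c ≠ d := (List.isChain_cons_cons.mp hchain).1
      have hchain' : List.IsChain (fun p q => p.1 ≠ q.1) ((d, b) :: gs) :=
        (List.isChain_cons_cons.mp hchain).2
      have hb : 1 ≤ b := hpos (d, b) (by simp)
      have hflat : flat ((d, b) :: gs) = List.replicate b d ++ flat gs := by
        simp [flat]
      have hlen : (flat ((d, b) :: gs)).length = b + (flat gs).length := by
        rw [hflat]; simp
      -- the full list, in the two shapes we need
      set L := u ++ (List.replicate a c ++ flat ((d, b) :: gs)) with hL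
      have hL2 : L = u ++ (List.replicate a c ++ (List.replicate b d ++ flat gs)) := by
        rw [hL, hflat]
      -- the head of flat gs is the char of gs' first group, which differs from d
      have hvhead : ∀ x, (flat gs).head? = some x → x ≠ d := by
        intro x hx
        cases gs with
        | nil => simp [flat] at hx
        | cons q t =>
            obtain ⟨e, m⟩ := q
            have hm : 1 ≤ m := hpos (e, m) (by simp)
            obtain ⟨m', rfl⟩ : ∃ m', m = m' + 1 := ⟨m - 1, by omega⟩
            simp only [flat, List.flatMap_cons, List.replicate_succ, List.cons_append,
              List.head?_cons, Option.some_inj] at hx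
            have hde : d ≠ e := (List.isChain_cons_cons.mp hchain').1
            exact fun hxd => hde (by rw [hx, hxd])
      -- split the range
      rw [hlen, ← List.range'_append_1, List.map_append, List.sum_append]
      -- first segment: the boundary term plus zeros inside the d-run
      obtain ⟨b', rfl⟩ : ∃ b', b = b' + 1 := ⟨b - 1, by omega⟩
      rw [List.range'_succ, List.map_cons, List.sum_cons]
      have hterm : term L (u.length + a) = ((min a (b' + 1) : Nat) : Int) := by
        unfold term
        rw [hL2]
        have hd0 : (u ++ (List.replicate a c ++ (List.replicate (b' + 1) d ++ flat gs))).getD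
            (u.length + a) 'a' = d := by
          have := getD_mid2 u (flat gs) c d a (b' + 1) 0 (by omega)
          simpa using this
        have hc0 : (u ++ (List.replicate a c ++ (List.replicate (b' + 1) d ++ flat gs))).getD
            (u.length + a - 1) 'a' = c := by
          have := getD_mid u (List.replicate (b' + 1) d ++ flat gs) c a (a - 1) (by omega)
          have hidx : u.length + (a - 1) = u.length + a - 1 := by omega
          rwa [hidx] at this
        rw [hd0, hc0, if_pos (fun he => hcd he.symm)]
        congr 1
        exact bExpand_min u (flat gs) c d a (b' + 1) ha (by omega) hcd hu hvhead
          (min a (b' + 1) - 1) 1 (by omega) (by omega) rfl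
      rw [hterm]
      have hzero : ((List.range' (u.length + a + 1) b').map (term L)).sum = 0 := by
        apply List.sum_eq_zero
        intro y hy
        simp only [List.mem_map] at hy
        obtain ⟨j, hj, rfl⟩ := hy
        rw [List.mem_range'_1] at hj
        have hj1 : 1 ≤ j - (u.length + a) := by omega
        have hj2 : j - (u.length + a) < b' + 1 := by omega
        have hjj : j = (u ++ List.replicate a c).length + (j - (u.length + a)) := by
          simp only [List.length_append, List.length_replicate]; omega
        rw [hjj, hL2, ← List.append_assoc]
        exact term_in_run (u ++ List.replicate a c) (flat gs) d (b' + 1)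
          (j - (u.length + a)) hj1 hj2
      rw [hzero]
      -- second segment: induction hypothesis with the c-run absorbed into the prefix
      have hih := ih (u ++ List.replicate a c) d (b' + 1) (by omega)
        (by
          intro x hx
          rw [getLast?_append_replicate u c a ha] at hx
          have hxc : c = x := by simpa using hx
          rw [← hxc]; exact hcd)
        hchain'
        (fun p hp => hpos p (by simp [hp]))
      have hlen2 : (u ++ List.replicate a c).length = u.length + a := by simp
      rw [hlen2] at hih
      have hLrw : (u ++ List.replicate a c) ++ (List.replicate (b' + 1) d ++ flat gs) = L := by
        rw [hL2, List.append_assoc]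
      rw [hLrw] at hih
      rw [hih]
      -- combine with the sumAdj recurrence
      simp only [lens, List.map_cons]
      rw [sumAdj_cons_cons]
      have : ((min a (b' + 1) : Nat) : Int) = min (a : Int) ((b' + 1 : Nat) : Int) :=
        Nat.cast_min a (b' + 1)
      rw [this]
      push_cast
      ring

-- ===== VERDICT (by name: the statement is the Claim_ definition above) =====
theorem countBinarySubstringsOnePass_spec : Claim_equal_countBinarySubstringsOnePass := by
  intro s _
  unfold Spec_countBinarySubstringsOnePass countBinarySubstringsOnePass countBinarySubstringsOnePass_alt
  cases hs : s.toList with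
  | nil => simp
  | cons c rest =>
      -- A's side: loopA computes the sum of mins over adjacent run lengths
      rcases hl : loopA rest c (0, 0, 1) with ⟨cnt, p, u⟩
      have hA := loopA_eq rest c 0 0 1
      rw [show ((1 : Nat) : Int) = (1 : Int) from rfl, hl] at hA
      simp only [hl]
      obtain ⟨g, gs, he, hge⟩ := runsFrom_head rest c 1
      rw [he] at hA
      simp only [lens, List.map_cons] at hA
      rw [sumAdj_cons_cons] at hA
      have hm : min (0 : Int) ((g : Nat) : Int) = 0 := by
        have : (0 : Int) ≤ (g : Int) := by positivity
        omega
      rw [hm] at hA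
      simp only [zero_add] at hA
      -- B's side: the boundary-expansion sum equals the same quantity
      have hflatl : List.replicate g c ++ flat gs = c :: rest := by
        have h1 := flat_runsFrom rest c 1
        rw [he] at h1
        simpa [flat] using h1
      have hlenl : (c :: rest).length = g + (flat gs).length := by
        rw [← hflatl]; simp
      have hchain := runsFrom_chain rest c 1
      rw [he] at hchain
      have hpos := runsFrom_pos rest c 1 (le_refl _)
      rw [he] at hpos
      have hpos' : ∀ p ∈ gs, 1 ≤ p.2 := fun p hp => hpos p (by simp [hp])
      rw [foldl_term]
      have hsplit : List.range' 1 ((c :: rest).length - 1)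
          = List.range' 1 (g - 1) ++ List.range' g (flat gs).length := by
        have h2 : 1 + (g - 1) = g := by omega
        have h3 := List.range'_append_1 (s := 1) (m := g - 1) (n := (flat gs).length)
        rw [h2] at h3
        rw [hlenl, show g + (flat gs).length - 1 = (g - 1) + (flat gs).length from by omega, ← h3]
      rw [hsplit, List.map_append, List.sum_append]
      have hzero : ((List.range' 1 (g - 1)).map (term (c :: rest))).sum = 0 := by
        apply List.sum_eq_zero
        intro y hy
        simp only [List.mem_map] at hy
        obtain ⟨j, hj, rfl⟩ := hy
        rw [List.mem_range'_1] at hj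
        have := term_in_run [] (flat gs) c g j (by omega) (by omega)
        rw [← hflatl]
        simpa using this
      rw [hzero, zero_add]
      have hsum := sum_terms gs [] c g (by omega)
        (by intro x hx; simp at hx) hchain hpos'
      simp only [List.nil_append, List.length_nil, Nat.zero_add] at hsum
      rw [hflatl] at hsum
      rw [hsum]
      simp only [lens, List.map_cons]
      rw [zero_add]
      exact hA
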